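-- pv_equiv track=rewrite | github.com/OrgPele/envctl | python/envctl_engine/actions/actions_test.py | is_package_test_command
-- ===== SOURCE A (Python) =====
-- from typing import Sequence
--
-- def is_package_test_command(command: Sequence[str]) -> bool:
--     rendered = [str(part).strip() for part in command if str(part).strip()]
--     if not rendered:
--         return False
--     first = rendered[0]
--     if first in {"npm", "pnpm", "bun"}:
--         return len(rendered) >= 3 and rendered[1] == "run" and rendered[2] == "test"
--     if first == "yarn":
--         return (len(rendered) >= 2 and rendered[1] == "test") or (
--             len(rendered) >= 3 and rendered[1] == "run" and rendered[2] == "test"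
--         )
--     return False
-- ===== SOURCE B (Python) =====
-- VALID_PREFIXES = {
--     ("npm", "run", "test"),
--     ("pnpm", "run", "test"),
--     ("bun", "run", "test"),
--     ("yarn", "run", "test"),
--     ("yarn", "test"),
-- }
--
-- def is_package_test_command(command):
--     rendered = [str(part).strip() for part in command if str(part).strip()]
--     return tuple(rendered[:3]) in VALID_PREFIXES or tuple(rendered[:2]) in VALID_PREFIXES
-- ===== Notes on version B (the rewrite author's own statement) =====
-- stated objective: simpler
-- what changed: Replaced A's per-first-word branch cascade (empty-check, head extraction, length guards and positional comparisons) with one table of five valid prefix tuples checked against rendered[:3] and rendered[:2].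
import Mathlib
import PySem

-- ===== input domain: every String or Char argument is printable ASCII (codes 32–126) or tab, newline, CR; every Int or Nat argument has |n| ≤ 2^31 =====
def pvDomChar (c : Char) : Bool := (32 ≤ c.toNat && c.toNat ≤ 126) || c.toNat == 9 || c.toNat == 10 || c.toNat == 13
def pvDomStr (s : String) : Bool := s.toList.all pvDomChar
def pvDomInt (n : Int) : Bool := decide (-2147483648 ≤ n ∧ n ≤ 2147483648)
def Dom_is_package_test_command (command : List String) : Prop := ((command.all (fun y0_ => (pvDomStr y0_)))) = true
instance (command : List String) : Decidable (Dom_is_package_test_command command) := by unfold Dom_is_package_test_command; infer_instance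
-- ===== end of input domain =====

-- B replaces A's per-first-word branch cascade with a single table of valid command
-- prefixes checked against rendered[:3] and rendered[:2]; objective: simpler, same cost.

-- ===== PORT A =====
def is_package_test_command (command : List String) : Bool :=
  let rendered := (command.map (fun part => PySem.Str.strip part)).filter (fun s => !(s == ""))
  if rendered.isEmpty then false
  else
    let first := rendered.headD ""
    if first == "npm" || first == "pnpm" || first == "bun" then
      decide (rendered.length ≥ 3) && rendered.getD 1 "" == "run" && rendered.getD 2 "" == "test"
    else if first == "yarn" then
      (decide (rendered.length ≥ 2) && rendered.getD 1 "" == "test") ||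
      (decide (rendered.length ≥ 3) && rendered.getD 1 "" == "run" && rendered.getD 2 "" == "test")
    else false

-- ===== PORT B =====
def pvValidPrefixes : PySem.Set (List String) :=
  PySem.Set.ofList [["npm", "run", "test"], ["pnpm", "run", "test"], ["bun", "run", "test"],
    ["yarn", "run", "test"], ["yarn", "test"]]

def is_package_test_command_alt (command : List String) : Bool :=
  let rendered := (command.map (fun part => PySem.Str.strip part)).filter (fun s => !(s == ""))
  PySem.Set.contains pvValidPrefixes (rendered.take 3) ||
    PySem.Set.contains pvValidPrefixes (rendered.take 2)

-- ===== PRECONDITION & SPEC =====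
def Spec_is_package_test_command (command : List String) (out : Bool) : Prop := out = is_package_test_command_alt command
instance (command : List String) (out : Bool) : Decidable (Spec_is_package_test_command command out) := by unfold Spec_is_package_test_command; infer_instance

-- ===== CLAIM (what is proved, stated in full; the proofs are below) =====
def Claim_equal_is_package_test_command : Prop := ∀ (command : List String), Dom_is_package_test_command command → Spec_is_package_test_command command (is_package_test_command command)

-- ===== LEMMAS AND PROOFS =====

-- ===== VERDICT (by name: the statement is the Claim_ definition above) =====
-- The two decision procedures agree on any already-rendered list.
lemma body_eq (r : List String) :
    (if r.isEmpty then false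
     else
       let first := r.headD ""
       if first == "npm" || first == "pnpm" || first == "bun" then
         decide (r.length ≥ 3) && r.getD 1 "" == "run" && r.getD 2 "" == "test"
       else if first == "yarn" then
         (decide (r.length ≥ 2) && r.getD 1 "" == "test") ||
         (decide (r.length ≥ 3) && r.getD 1 "" == "run" && r.getD 2 "" == "test")
       else false)
    = (PySem.Set.contains pvValidPrefixes (r.take 3) ||
        PySem.Set.contains pvValidPrefixes (r.take 2)) := by
  match r with
  | [] => rfl
  | [a] =>
    simp [pvValidPrefixes, PySem.Set.ofList, PySem.Set.contains, PySem.Set.add, List.take]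
  | [a, b] =>
    simp only [pvValidPrefixes, PySem.Set.ofList, PySem.Set.contains, List.take,
      List.contains]
    simp only [List.isEmpty, List.headD, List.getD, List.getElem?_cons_zero,
      List.getElem?_cons_succ, List.length]
    by_cases ha1 : a = "npm" <;> by_cases ha2 : a = "pnpm" <;> by_cases ha3 : a = "bun" <;>
      by_cases ha4 : a = "yarn" <;> by_cases hb : b = "test" <;> simp_all
  | a :: b :: c :: rest =>
    simp only [pvValidPrefixes, PySem.Set.ofList, PySem.Set.contains, List.take,
      List.contains]
    simp only [List.isEmpty, List.headD, List.getD, List.getElem?_cons_zero,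
      List.getElem?_cons_succ, List.length]
    by_cases ha1 : a = "npm" <;> by_cases ha2 : a = "pnpm" <;> by_cases ha3 : a = "bun" <;>
      by_cases ha4 : a = "yarn" <;> by_cases hb1 : b = "run" <;> by_cases hb2 : b = "test" <;>
      by_cases hc : c = "test" <;> simp_all

theorem is_package_test_command_spec : Claim_equal_is_package_test_command := by
  intro command _
  unfold Spec_is_package_test_command is_package_test_command is_package_test_command_alt
  exact body_eq _
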